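-- pv_equiv track=rewrite | github.com/ekg/beats | code/nikclave.py | beat2dur
-- ===== SOURCE A (Python) =====
-- def beat2dur(beat):
--     durs = []
--     current=1 #funk/hack, we start on a 1
--     for e in beat:
--         if 0==e:
--             current+=1
--         else:
--             durs.append(current)
--             current = 1
--     durs.append(current)
--     return durs[1:]# so dirty
-- ===== SOURCE B (Python) =====
-- def beat2dur(beat):
--     idx = [i for i, e in enumerate(beat) if e != 0]
--     if not idx:
--         return []
--     return [j - i for i, j in zip(idx, idx[1:])] + [len(beat) - idx[-1]]
-- ===== Notes on version B (the rewrite author's own statement) =====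
-- stated objective: alternative
-- what changed: Instead of simulating the run counter and dropping durs[1:], B collects the onset indices in one pass and returns consecutive index differences plus the trailing run length.
import Mathlib
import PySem

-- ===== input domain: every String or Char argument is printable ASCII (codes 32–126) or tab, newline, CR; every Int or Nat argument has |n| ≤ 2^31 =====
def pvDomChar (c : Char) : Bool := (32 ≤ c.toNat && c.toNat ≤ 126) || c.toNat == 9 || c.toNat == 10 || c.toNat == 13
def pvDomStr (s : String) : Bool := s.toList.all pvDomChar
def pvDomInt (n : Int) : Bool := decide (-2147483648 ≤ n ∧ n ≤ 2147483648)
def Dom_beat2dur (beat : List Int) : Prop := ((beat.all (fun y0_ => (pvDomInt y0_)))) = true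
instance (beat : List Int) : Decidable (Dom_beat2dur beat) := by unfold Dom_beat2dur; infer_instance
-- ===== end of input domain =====

-- B replaces A's run-counter simulation (and its dropped first element) by the
-- consecutive differences of the onset indices plus the trailing run; alternative, same cost.

-- ===== PORT A =====
def beat2dur (beat : List Int) : List Int :=
  let r := beat.foldl
    (fun (s : List Int × Int) e => if (0 : Int) = e then (s.1, s.2 + 1) else (s.1 ++ [s.2], 1))
    ([], 1)
  let durs := r.1 ++ [r.2]
  PySem.List.slice durs (some 1) none

-- ===== PORT B =====
def beat2dur_alt (beat : List Int) : List Int :=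
  let idx : List Int := ((PySem.List.enumerate beat 0).filter (fun p => p.2 != 0)).map Prod.fst
  if idx = [] then []
  else ((idx.zip (PySem.List.slice idx (some 1) none)).map (fun p => p.2 - p.1))
        ++ [(beat.length : Int) - PySem.List.pyGetD idx (-1) 0]

-- ===== PRECONDITION & SPEC =====
def Spec_beat2dur (beat : List Int) (out : List Int) : Prop := out = beat2dur_alt beat
instance (beat : List Int) (out : List Int) : Decidable (Spec_beat2dur beat out) := by unfold Spec_beat2dur; infer_instance

-- ===== CLAIM (what is proved, stated in full; the proofs are below) =====
def Claim_equal_beat2dur : Prop := ∀ (beat : List Int), Dom_beat2dur beat → Spec_beat2dur beat (beat2dur beat)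

-- ===== LEMMAS AND PROOFS =====

-- onset indices of the pattern, as Python ints
def ons : List Int → List Int
  | [] => []
  | x :: xs => if x = 0 then (ons xs).map (· + 1) else 0 :: (ons xs).map (· + 1)

-- consecutive differences
def gaps : List Int → List Int
  | [] => []
  | [_] => []
  | a :: b :: t => (b - a) :: gaps (b :: t)

theorem gaps_map_add : ∀ (l : List Int), gaps (l.map (· + 1)) = gaps l
  | [] => rfl
  | [_] => rfl
  | a :: b :: t => by
      simpa [gaps, List.map] using gaps_map_add (b :: t)

theorem headD_map_add (l : List Int) (h : l ≠ []) :
    (l.map (· + 1)).headD 0 = l.headD 0 + 1 := by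
  cases l with
  | nil => exact absurd rfl h
  | cons a t => simp

theorem getLastD_map_add : ∀ (l : List Int), l ≠ [] →
    (l.map (· + 1)).getLastD 0 = l.getLastD 0 + 1
  | [], h => absurd rfl h
  | [a], _ => rfl
  | a :: b :: t, _ => by
      simpa [List.map, List.getLastD] using getLastD_map_add (b :: t) (by simp)

theorem gaps_cons_of_ne (x : Int) (l : List Int) (h : l ≠ []) :
    gaps (x :: l) = (l.headD 0 - x) :: gaps l := by
  cases l with
  | nil => exact absurd rfl h
  | cons a t => simp [gaps]

theorem map_add_eq_nil_iff (l : List Int) : (l.map (· + 1)) = [] ↔ l = [] := by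
  cases l <;> simp

-- characterisation of A's fold
theorem foldA (xs : List Int) : ∀ (d : List Int) (c : Int),
    xs.foldl
      (fun (s : List Int × Int) e => if (0 : Int) = e then (s.1, s.2 + 1) else (s.1 ++ [s.2], 1))
      (d, c) =
    if ons xs = [] then (d, c + (xs.length : Int))
    else (d ++ (c + (ons xs).headD 0) :: gaps (ons xs),
          (xs.length : Int) - (ons xs).getLastD 0) := by
  induction xs with
  | nil => intro d c; simp [ons]
  | cons x xs ih =>
    intro d c
    by_cases hx : x = 0
    · subst hx
      rw [List.foldl_cons, if_pos rfl, ih,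
          show ons ((0 : Int) :: xs) = (ons xs).map (· + 1) from by simp [ons]]
      by_cases h0 : ons xs = []
      · rw [if_pos h0, h0, List.map_nil, if_pos rfl]
        refine Prod.ext rfl ?_
        simp only [List.length_cons]
        push_cast; ring
      · rw [if_neg h0, if_neg (by simpa [map_add_eq_nil_iff] using h0),
            gaps_map_add, headD_map_add _ h0, getLastD_map_add _ h0]
        refine Prod.ext ?_ ?_
        · simp only []; congr 2; ring
        · simp only [List.length_cons]; push_cast; ring
    · rw [List.foldl_cons, if_neg (fun h => hx (Eq.symm h)), ih,
          show ons (x :: xs) = 0 :: (ons xs).map (· + 1) from by simp [ons, hx]]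
      by_cases h0 : ons xs = []
      · rw [if_pos h0, h0, List.map_nil, if_neg (by simp)]
        refine Prod.ext ?_ ?_
        · show d ++ [c] = d ++ (c + List.headD [0] 0) :: gaps [0]
          simp [gaps]
        · show (1 : Int) + (xs.length : Int) = ((x :: xs).length : Int) - List.getLastD [0] 0
          rw [show List.getLastD [(0 : Int)] 0 = 0 from rfl]
          simp only [List.length_cons]
          push_cast; ring
      · have hne : (ons xs).map (· + 1) ≠ [] := by simpa [map_add_eq_nil_iff] using h0
        rw [if_neg h0, if_neg (by simp),
            gaps_cons_of_ne _ _ hne, gaps_map_add, headD_map_add _ h0]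
        have hlast : (0 :: (ons xs).map (· + 1)).getLastD 0 = (ons xs).getLastD 0 + 1 := by
          cases h : ons xs with
          | nil => exact absurd h h0
          | cons a t =>
            have := getLastD_map_add (a :: t) (by simp)
            simp only [h, List.map_cons] at *
            simpa [List.getLastD] using this
        rw [hlast]
        refine Prod.ext ?_ ?_
        · show (d ++ [c]) ++ ((1 : Int) + (ons xs).headD 0) :: gaps (ons xs)
              = d ++ (c + (0 :: (ons xs).map (· + 1)).headD 0) :: ((ons xs).headD 0 + 1 - 0) :: gaps (ons xs)
          simp only [List.append_assoc, List.cons_append, List.nil_append, List.headD_cons, add_zero, sub_zero]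
          rw [show (1 : Int) + (ons xs).headD 0 = (ons xs).headD 0 + 1 from by ring]
        · show (xs.length : Int) - (ons xs).getLastD 0
              = ((x :: xs).length : Int) - ((ons xs).getLastD 0 + 1)
          simp only [List.length_cons]; push_cast; ring

-- B's index list is ons
theorem idx_eq (xs : List Int) : ∀ (s : Int),
    ((PySem.List.enumerate xs s).filter (fun p => p.2 != 0)).map Prod.fst
      = (ons xs).map (· + s) := by
  induction xs with
  | nil => intro s; simp [PySem.List.enumerate_nil, ons]
  | cons x xs ih =>
    intro s
    rw [PySem.List.enumerate_cons]
    by_cases hx : x = 0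
    · subst hx
      rw [show ons ((0 : Int) :: xs) = (ons xs).map (· + 1) from by simp [ons]]
      simp only [List.filter_cons, bne_self_eq_false, Bool.false_eq_true, if_false]
      rw [ih (s + 1), List.map_map]
      apply List.map_congr_left
      intro a _; simp; ring
    · rw [show ons (x :: xs) = 0 :: (ons xs).map (· + 1) from by simp [ons, hx]]
      simp only [List.filter_cons, if_pos (by simpa using hx : ((s, x).2 != 0) = true)]
      rw [List.map_cons, ih (s + 1)]
      simp only [List.map_cons, List.map_map]
      refine congrArg₂ _ (by simp) ?_
      apply List.map_congr_left
      intro a _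
      simp only [Function.comp_apply]
      ring

theorem zip_gaps : ∀ (l : List Int),
    (l.zip l.tail).map (fun p : Int × Int => p.2 - p.1) = gaps l
  | [] => rfl
  | [_] => rfl
  | a :: b :: t => by
      simpa [gaps] using zip_gaps (b :: t)

theorem pyGetD_last (l : List Int) (h : l ≠ []) :
    PySem.List.pyGetD l (-1) 0 = l.getLastD 0 := by
  rw [PySem.List.pyGetD_neg_one l 0 h, List.getLastD_eq_getLast?,
      List.getLast?_eq_some_getLast h, Option.getD_some]

-- ===== VERDICT (by name: the statement is the Claim_ definition above) =====
theorem beat2dur_spec : Claim_equal_beat2dur := by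
  intro beat _
  unfold Spec_beat2dur beat2dur beat2dur_alt
  have hidx : ((PySem.List.enumerate beat 0).filter (fun p => p.2 != 0)).map Prod.fst
      = ons beat := by
    rw [idx_eq beat 0]; simp
  simp only [hidx]
  rw [foldA beat [] 1]
  by_cases h0 : ons beat = []
  · rw [if_pos h0, if_pos h0]
    simp [PySem.List.slice_from_one]
  · rw [if_neg h0, if_neg h0,
        PySem.List.slice_from_one, PySem.List.slice_from_one, zip_gaps, pyGetD_last _ h0]
    simp
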